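-- pv_equiv track=rewrite | github.com/Garenpku/reading-comprehension | batch_generator_coreference.py | process
-- ===== SOURCE A (Python) =====
-- def process(utter):
--     res = []
--     pos = []
--     for query in utter:
--         tmp = []
--         tmp_pos = []
--         record = 0
--         last = 0
--         for line in query:
--             tmp += line
--             record += len(line)
--             tmp_pos.append(int((record + last) / 2))
--             last += len(line)
--         res.append(tmp)
--         pos.append(tmp_pos)
--     return res, pos
-- ===== SOURCE B (Python) =====
-- def process(utter):
--     res = []
--     pos = []
--     for query in utter:
--         bounds = [0]
--         for line in query:
--             bounds.append(bounds[-1] + len(line))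
--         res.append([x for line in query for x in line])
--         pos.append([(bounds[i] + bounds[i + 1]) // 2 for i in range(len(query))])
--     return res, pos
-- ===== Notes on version B (the rewrite author's own statement) =====
-- stated objective: alternative
-- what changed: Replaces A's fused loop that grows tmp/record/last/tmp_pos together with a prefix-sum boundary table built first, then an independent flatten comprehension and a midpoint comprehension indexing the table ((b[i]+b[i+1])//2 instead of int((record+last)/2)).
import Mathlib
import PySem

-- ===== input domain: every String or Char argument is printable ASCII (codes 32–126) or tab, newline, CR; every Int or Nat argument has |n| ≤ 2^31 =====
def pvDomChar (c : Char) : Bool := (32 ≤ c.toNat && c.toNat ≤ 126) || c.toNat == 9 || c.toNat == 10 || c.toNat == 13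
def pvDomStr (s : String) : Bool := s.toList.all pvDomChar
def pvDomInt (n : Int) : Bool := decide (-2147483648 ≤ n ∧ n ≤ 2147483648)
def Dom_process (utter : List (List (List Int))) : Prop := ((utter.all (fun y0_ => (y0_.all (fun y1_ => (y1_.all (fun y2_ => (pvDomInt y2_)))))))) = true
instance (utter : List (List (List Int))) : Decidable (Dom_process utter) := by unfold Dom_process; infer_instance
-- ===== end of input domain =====

-- B replaces A's fused accumulate-and-emit loop with a prefix boundary table, an independent
-- flatten and a midpoint pass over the table (objective: alternative decomposition, same cost).

-- ===== PORT A =====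
-- state = (tmp, tmp_pos, record, last); Python's int((record+last)/2) on these nonnegative
-- values is exactly floor division by 2, ported as PySem.Int.floordiv.
def process (utter : List (List (List Int))) : List (List Int) × List (List Int) :=
  utter.foldl (fun acc query =>
    let inner := query.foldl (fun (st : List Int × List Int × Int × Int) line =>
      let tmp := st.1 ++ line
      let record := st.2.2.1 + (line.length : Int)
      let tmp_pos := st.2.1 ++ [PySem.Int.floordiv (record + st.2.2.2) 2]
      let last := st.2.2.2 + (line.length : Int)
      (tmp, tmp_pos, record, last))
      (([] : List Int), ([] : List Int), (0 : Int), (0 : Int))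
    (acc.1 ++ [inner.1], acc.2 ++ [inner.2.1]))
    (([] : List (List Int)), ([] : List (List Int)))

-- ===== PORT B =====
-- bounds[-1] is List.getLastD; '//' is PySem.Int.floordiv; the flatten comprehension is flatMap.
def process_alt (utter : List (List (List Int))) : List (List Int) × List (List Int) :=
  utter.foldl (fun acc query =>
    let bounds := query.foldl (fun (bs : List Int) line => bs ++ [bs.getLastD 0 + (line.length : Int)]) [(0 : Int)]
    let flat := query.flatMap (fun line => line)
    let mids := (List.range query.length).map (fun i =>
      PySem.Int.floordiv (bounds.getD i 0 + bounds.getD (i + 1) 0) 2)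
    (acc.1 ++ [flat], acc.2 ++ [mids]))
    (([] : List (List Int)), ([] : List (List Int)))

-- ===== PRECONDITION & SPEC =====
def Spec_process (utter : List (List (List Int))) (out : List (List Int) × List (List Int)) : Prop := out = process_alt utter
instance (utter : List (List (List Int))) (out : List (List Int) × List (List Int)) : Decidable (Spec_process utter out) := by unfold Spec_process; infer_instance

-- ===== CLAIM (what is proved, stated in full; the proofs are below) =====
def Claim_equal_process : Prop := ∀ (utter : List (List (List Int))), Dom_process utter → Spec_process utter (process utter)

-- ===== LEMMAS AND PROOFS =====

/-- The per-query midpoint list, starting at offset `s`. -/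
def midsSpec : Int → List (List Int) → List Int
  | _, [] => []
  | s, l :: q => PySem.Int.floordiv ((s + (l.length : Int)) + s) 2 :: midsSpec (s + l.length) q

/-- The per-query boundary table produced by B's inner loop, starting at offset `s`. -/
def prefixList : Int → List (List Int) → List Int
  | s, [] => [s]
  | s, l :: q => s :: prefixList (s + l.length) q

def sumLen (q : List (List Int)) : Int := ((q.map List.length).sum : Nat)

lemma foldA_eq (q : List (List Int)) (tmp tpos : List Int) (s : Int) :
    q.foldl (fun (st : List Int × List Int × Int × Int) line =>
      let tmp := st.1 ++ line
      let record := st.2.2.1 + (line.length : Int)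
      let tmp_pos := st.2.1 ++ [PySem.Int.floordiv (record + st.2.2.2) 2]
      let last := st.2.2.2 + (line.length : Int)
      (tmp, tmp_pos, record, last)) (tmp, tpos, s, s)
    = (tmp ++ q.flatMap (fun line => line), tpos ++ midsSpec s q, s + sumLen q, s + sumLen q) := by
  induction q generalizing tmp tpos s with
  | nil => simp [sumLen, midsSpec]
  | cons l q ih =>
      simp only [List.foldl_cons, ih, midsSpec, sumLen, List.map_cons, List.sum_cons,
        List.flatMap_cons, List.append_assoc, List.cons_append, List.nil_append,
        Prod.mk.injEq]
      refine ⟨trivial, trivial, ?_, ?_⟩ <;> · push_cast; ring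

lemma foldB_bounds (q : List (List Int)) (pre : List Int) (s : Int) :
    q.foldl (fun (bs : List Int) line => bs ++ [bs.getLastD 0 + (line.length : Int)]) (pre ++ [s])
    = pre ++ prefixList s q := by
  induction q generalizing pre s with
  | nil => simp [prefixList]
  | cons l q ih =>
      simp only [List.foldl_cons, prefixList]
      rw [List.getLastD_concat, show pre ++ [s] ++ [s + (l.length : Int)]
            = (pre ++ [s]) ++ [s + (l.length : Int)] by simp,
          ih (pre ++ [s]) (s + l.length)]
      simp

lemma prefixList_head (q : List (List Int)) (s : Int) : (prefixList s q).getD 0 0 = s := by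
  cases q <;> simp [prefixList]

lemma mids_eq (q : List (List Int)) (s : Int) :
    (List.range q.length).map (fun i =>
      PySem.Int.floordiv ((prefixList s q).getD i 0 + (prefixList s q).getD (i + 1) 0) 2)
    = midsSpec s q := by
  induction q generalizing s with
  | nil => simp [midsSpec]
  | cons l q ih =>
      simp only [List.length_cons, List.range_succ_eq_map, List.map_cons, List.map_map]
      simp only [midsSpec, List.cons.injEq]
      refine ⟨?_, ?_⟩
      · simp only [prefixList, List.getD_cons_zero, List.getD_cons_succ, prefixList_head]
        congr 1; ring
      · rw [← ih (s + l.length)]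
        apply List.map_congr_left
        intro i _
        simp [prefixList]

lemma per_query (q : List (List Int)) :
    (let bounds := q.foldl (fun (bs : List Int) line => bs ++ [bs.getLastD 0 + (line.length : Int)]) [(0 : Int)]
     (List.range q.length).map (fun i =>
        PySem.Int.floordiv (bounds.getD i 0 + bounds.getD (i + 1) 0) 2))
    = midsSpec 0 q := by
  have hb := foldB_bounds q [] 0
  simp only [List.nil_append] at hb
  simp only [hb]
  exact mids_eq q 0

theorem process_eq_alt (utter : List (List (List Int))) : process utter = process_alt utter := by
  unfold process process_alt
  induction utter using List.reverseRecOn with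
  | nil => rfl
  | append_singleton us q ih =>
      simp only [List.foldl_append, List.foldl_cons, List.foldl_nil, ih]
      have ha := foldA_eq q [] [] 0
      simp only [List.nil_append] at ha
      simp only [ha, per_query]

-- ===== VERDICT (by name: the statement is the Claim_ definition above) =====
theorem process_spec : Claim_equal_process := by
  intro utter _
  unfold Spec_process
  exact process_eq_alt utter
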